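-- pv_equiv track=rewrite | github.com/Tenykim1109/Problem-Solving | BOJ/5430_AC.py | solution
-- ===== SOURCE A (Python) =====
-- def solution(cmds, nums, n):
--     cmds.replace('RR', '') #뒤집기를 두 번 하면 뒤집지 않는 것과 같음
--     s, e, rev = 0, 0, False
--     for cmd in cmds:
--         if cmd == 'R':
--             rev = not rev
--         elif cmd == 'D':
--             if not rev: #역순정렬이 아닐 경우
--                 s += 1
--             else:
--                 e += 1
--
--     if s+e <= n:
--         res = nums[s:n - e]
--         if not rev:
--             return '['+','.join(res)+']'
--         else:
--             return '['+','.join(res[::-1])+']'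
--     else:
--         return 'error'
-- ===== SOURCE B (Python) =====
-- def solution(cmds, nums, n):
--     # Split the command string on 'R': D's in even-numbered segments drop from
--     # the front, D's in odd-numbered segments drop from the back, and the final
--     # orientation is reversed iff the number of segments is even.
--     segs = cmds.split('R')
--     front, back = 0, 0
--     i = 0
--     while i < len(segs):
--         front += segs[i].count('D')
--         if i + 1 < len(segs):
--             back += segs[i + 1].count('D')
--         i += 2
--     if n < front + back:
--         return 'error'
--     kept = nums[front:n - back]
--     if len(segs) % 2 == 0:
--         kept = kept[::-1]
--     return '[' + ','.join(kept) + ']'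
-- ===== Notes on version B (the rewrite author's own statement) =====
-- stated objective: alternative
-- what changed: B splits the command string on 'R' and sums the 'D' counts of even- and odd-positioned segments pairwise (front drops vs back drops, orientation from the segment count's parity), instead of A's character-by-character scan with a reversed flag routing each 'D'.
import Mathlib
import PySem

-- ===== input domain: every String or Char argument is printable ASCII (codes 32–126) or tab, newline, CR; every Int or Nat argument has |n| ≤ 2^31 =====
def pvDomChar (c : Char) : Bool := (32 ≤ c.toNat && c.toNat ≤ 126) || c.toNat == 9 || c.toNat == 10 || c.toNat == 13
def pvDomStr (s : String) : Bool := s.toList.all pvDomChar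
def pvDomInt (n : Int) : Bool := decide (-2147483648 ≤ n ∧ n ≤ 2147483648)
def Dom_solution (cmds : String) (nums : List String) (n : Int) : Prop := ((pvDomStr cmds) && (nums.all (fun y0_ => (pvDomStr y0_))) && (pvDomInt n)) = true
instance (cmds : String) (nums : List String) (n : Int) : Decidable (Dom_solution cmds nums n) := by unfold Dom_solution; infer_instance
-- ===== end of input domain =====

-- One honest line: B splits the command string on 'R' and pairwise-sums the 'D'
-- counts of the segments instead of A's char-by-char scan with a reversed flag;
-- same cost, different decomposition.

-- ===== PORT A =====
-- A's loop state (s, e, rev), processed left to right over the characters.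
def solStepA (st : Int × Int × Bool) (cmd : Char) : Int × Int × Bool :=
  if cmd = 'R' then (st.1, st.2.1, !st.2.2)
  else if cmd = 'D' then
    if !st.2.2 then (st.1 + 1, st.2.1, st.2.2) else (st.1, st.2.1 + 1, st.2.2)
  else st

def solution (cmds : String) (nums : List String) (n : Int) : String :=
  let _ := PySem.Str.replace cmds "RR" ""   -- A's discarded replace (no-op)
  let st := cmds.toList.foldl solStepA (0, 0, false)
  if st.1 + st.2.1 ≤ n then
    let res := PySem.List.slice nums (some st.1) (some (n - st.2.1))
    if !st.2.2 then "[" ++ PySem.Str.join "," res ++ "]"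
    else "[" ++ PySem.Str.join "," res.reverse ++ "]"   -- res[::-1]
  else "error"

-- ===== PORT B =====
-- Source B's while loop over the segment list, two segments per iteration,
-- accumulating (front, back); i < len ↔ the list is nonempty, i+1 < len ↔ it has ≥ 2.
def altDrops : List (List Char) → Int → Int → Int × Int
  | [], front, back => (front, back)
  | [a], front, back => (front + (PySem.Chars.count a ['D'] : Int), back)
  | a :: c :: rest, front, back =>
      altDrops rest (front + (PySem.Chars.count a ['D'] : Int))
                    (back + (PySem.Chars.count c ['D'] : Int))

def solution_alt (cmds : String) (nums : List String) (n : Int) : String :=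
  let segs := PySem.Chars.splitOn cmds.toList ['R']   -- cmds.split('R')
  let fb := altDrops segs 0 0
  if n < fb.1 + fb.2 then "error"
  else
    let kept := PySem.List.slice nums (some fb.1) (some (n - fb.2))
    let kept := if segs.length % 2 = 0 then kept.reverse else kept   -- kept[::-1]
    "[" ++ PySem.Str.join "," kept ++ "]"

-- ===== PRECONDITION & SPEC =====
def Spec_solution (cmds : String) (nums : List String) (n : Int) (out : String) : Prop := out = solution_alt cmds nums n
instance (cmds : String) (nums : List String) (n : Int) (out : String) : Decidable (Spec_solution cmds nums n out) := by unfold Spec_solution; infer_instance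

-- ===== CLAIM (what is proved, stated in full; the proofs are below) =====
def Claim_equal_solution : Prop := ∀ (cmds : String) (nums : List String) (n : Int), Dom_solution cmds nums n → Spec_solution cmds nums n (solution cmds nums n)

-- ===== LEMMAS AND PROOFS =====

-- Chars.count with a one-character needle is List.count.
theorem countGo_singleton (c : Char) : ∀ (l : List Char) (fuel acc : Nat), l.length ≤ fuel →
    PySem.Chars.count.go [c] fuel l acc = acc + l.count c := by
  intro l
  induction l with
  | nil => intro fuel acc h; cases fuel <;> simp [PySem.Chars.count.go]
  | cons x t ih =>
    intro fuel acc h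
    cases fuel with
    | zero => simp at h
    | succ fuel =>
      simp only [List.length_cons, Nat.succ_le_succ_iff] at h
      by_cases hx : x = c
      · subst hx
        simp [PySem.Chars.count.go, List.isPrefixOf, ih fuel (acc + 1) h]
        omega
      · simp [PySem.Chars.count.go, List.isPrefixOf, hx, Ne.symm hx, ih fuel acc h]

theorem count_singleton (l : List Char) (c : Char) :
    PySem.Chars.count l [c] = l.count c := by
  simp [PySem.Chars.count, countGo_singleton c l l.length 0 le_rfl]

-- reference splitter for a one-character separator
def splitCh (r : Char) : List Char → List (List Char)
  | [] => [[]]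
  | c :: t => if c = r then [] :: splitCh r t
              else match splitCh r t with
                   | [] => [[c]]      -- unreachable
                   | h :: rest => (c :: h) :: rest

theorem splitCh_ne_nil (r : Char) (l : List Char) : splitCh r l ≠ [] := by
  cases l with
  | nil => simp [splitCh]
  | cons c t =>
    simp only [splitCh]
    split_ifs
    · simp
    · rcases h : splitCh r t with _ | ⟨h₁, rest⟩ <;> simp

def consHead (pre : List Char) : List (List Char) → List (List Char)
  | [] => [pre]
  | h :: rest => (pre ++ h) :: rest

theorem splitOnGo_eq (r : Char) : ∀ (l : List Char) (fuel : Nat) (cur : List Char)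
    (acc : List (List Char)), l.length < fuel →
    PySem.Chars.splitOn.go [r] fuel l cur acc = acc.reverse ++ consHead cur.reverse (splitCh r l) := by
  intro l
  induction l with
  | nil =>
    intro fuel cur acc h
    cases fuel with
    | zero => simp at h
    | succ fuel => simp [PySem.Chars.splitOn.go, splitCh, consHead]
  | cons c t ih =>
    intro fuel cur acc h
    cases fuel with
    | zero => simp at h
    | succ fuel =>
      simp only [List.length_cons, Nat.succ_lt_succ_iff] at h
      by_cases hc : c = r
      · subst hc
        simp only [PySem.Chars.splitOn.go, List.isPrefixOf, beq_self_eq_true, Bool.true_and,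
          if_true, List.length_cons, List.length_nil, List.drop_succ_cons, List.drop_zero]
        rw [ih fuel [] (cur.reverse :: acc) h]
        simp [splitCh]
        rcases hs : splitCh c t with _ | ⟨h₁, rest⟩
        · exact absurd hs (splitCh_ne_nil c t)
        · simp [consHead]
      · simp only [PySem.Chars.splitOn.go, List.isPrefixOf]
        rw [if_neg (by simp [Ne.symm hc])]
        rw [ih fuel (c :: cur) acc h]
        simp only [splitCh, if_neg hc]
        rcases hs : splitCh r t with _ | ⟨h₁, rest⟩
        · exact absurd hs (splitCh_ne_nil r t)
        · simp [consHead]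

theorem splitOn_eq_splitCh (l : List Char) (r : Char) :
    PySem.Chars.splitOn l [r] = splitCh r l := by
  rw [PySem.Chars.splitOn, splitOnGo_eq r l (l.length + 1) [] [] (by omega)]
  rcases hs : splitCh r l with _ | ⟨h₁, rest⟩
  · exact absurd hs (splitCh_ne_nil r l)
  · simp [consHead]

-- pure front/back 'D'-drop sums of the segment list (even / odd positions)
def dropsF : List (List Char) → Int
  | [] => 0
  | [a] => (a.count 'D' : Int)
  | a :: _ :: rest => (a.count 'D' : Int) + dropsF rest

def dropsB : List (List Char) → Int
  | [] => 0
  | [_] => 0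
  | _ :: c :: rest => (c.count 'D' : Int) + dropsB rest

theorem altDrops_acc : ∀ (segs : List (List Char)) (f b : Int),
    altDrops segs f b = (f + dropsF segs, b + dropsB segs)
  | [], f, b => by simp [altDrops, dropsF, dropsB]
  | [a], f, b => by simp [altDrops, dropsF, dropsB, count_singleton]
  | a :: c :: rest, f, b => by
      simp only [altDrops, dropsF, dropsB, altDrops_acc rest, count_singleton, Prod.mk.injEq]
      constructor <;> ring

theorem drops_cons : ∀ (x : List Char) (segs : List (List Char)),
    dropsF (x :: segs) = (x.count 'D' : Int) + dropsB segs ∧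
    dropsB (x :: segs) = dropsF segs
  | x, [] => by simp [dropsF, dropsB]
  | x, y :: rest => by
      have h := drops_cons y rest
      refine ⟨?_, h.1.symm⟩
      show (x.count 'D' : Int) + dropsF rest = (x.count 'D' : Int) + dropsB (y :: rest)
      rw [h.2]

-- how A's step acts, by command
theorem stepA_R (s e : Int) (r : Bool) : solStepA (s, e, r) 'R' = (s, e, !r) := by
  simp [solStepA]

theorem stepA_D (s e : Int) (r : Bool) :
    solStepA (s, e, r) 'D' = (if r then (s, e + 1, r) else (s + 1, e, r)) := by
  cases r <;> simp [solStepA]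

theorem stepA_other (s e : Int) (r : Bool) (c : Char) (hR : c ≠ 'R') (hD : c ≠ 'D') :
    solStepA (s, e, r) c = (s, e, r) := by
  simp [solStepA, hR, hD]

-- the main correspondence: A's fold over the characters vs the segment summary
theorem foldA_eq (l : List Char) : ∀ (s e : Int) (r : Bool),
    l.foldl solStepA (s, e, r) =
      (s + (if r then dropsB (splitCh 'R' l) else dropsF (splitCh 'R' l)),
       e + (if r then dropsF (splitCh 'R' l) else dropsB (splitCh 'R' l)),
       xor r (decide ((splitCh 'R' l).length % 2 = 0))) := by
  induction l with
  | nil =>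
    intro s e r
    cases r <;> simp [splitCh, dropsF, dropsB]
  | cons c t ih =>
    intro s e r
    by_cases hc : c = 'R'
    · subst hc
      have hcons := drops_cons [] (splitCh 'R' t)
      rw [List.foldl_cons, stepA_R, ih]
      have hsp : splitCh 'R' ('R' :: t) = [] :: splitCh 'R' t := by simp [splitCh]
      rw [hsp, hcons.1, hcons.2]
      have hpar : ((([] : List Char) :: splitCh 'R' t).length % 2 = 0) ↔
          ¬ ((splitCh 'R' t).length % 2 = 0) := by simp [List.length_cons]; omega
      simp only [List.count_nil, Nat.cast_zero, zero_add]
      cases r <;> simp_all <;>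
        cases hdec : decide ((splitCh 'R' t).length % 2 = 0) <;> simp_all
    · rcases hs : splitCh 'R' t with _ | ⟨h₁, rest⟩
      · exact absurd hs (splitCh_ne_nil 'R' t)
      · have hsp : splitCh 'R' (c :: t) = (c :: h₁) :: rest := by
          simp only [splitCh, if_neg hc, hs]
        have hcons := drops_cons (c :: h₁) rest
        have hcons' := drops_cons h₁ rest
        rw [hsp]
        by_cases hd : c = 'D'
        · subst hd
          rw [List.foldl_cons, stepA_D]
          cases r
          · rw [if_neg (by simp), ih, hs]
            rw [hcons.1, hcons.2, hcons'.1, hcons'.2]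
            simp [Prod.ext_iff]
            ring
          · rw [if_pos rfl, ih, hs]
            rw [hcons.1, hcons.2, hcons'.1, hcons'.2]
            simp [Prod.ext_iff]
            ring
        · rw [List.foldl_cons, stepA_other s e r c hc hd, ih, hs]
          rw [hcons.1, hcons.2, hcons'.1, hcons'.2]
          simp [hd]

theorem solution_eq_alt (cmds : String) (nums : List String) (n : Int) :
    solution cmds nums n = solution_alt cmds nums n := by
  simp only [solution, solution_alt, foldA_eq, splitOn_eq_splitCh, altDrops_acc,
    Bool.false_xor, Bool.false_eq_true, if_false, zero_add]
  by_cases h : dropsF (splitCh 'R' cmds.toList) + dropsB (splitCh 'R' cmds.toList) ≤ n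
  · by_cases hp : (splitCh 'R' cmds.toList).length % 2 = 0 <;>
      simp [h, not_lt.mpr h, hp]
  · simp [h, not_le.mp h]

-- ===== VERDICT (by name: the statement is the Claim_ definition above) =====
theorem solution_spec : Claim_equal_solution := by
  intro cmds nums n _
  exact solution_eq_alt cmds nums n
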